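-- pv_equiv track=rewrite | github.com/UCSantaCruzComputationalGenomicsLab/last | scripts/last-dotplot.py | matchAndInsertLengths
-- ===== SOURCE A (Python) =====
-- import sys, os, re, itertools, optparse
--
-- def isGapless(alignmentColumn):
--     return "-" not in alignmentColumn
--
-- def matchAndInsertLengths(alignmentColumns):
--     for k, v in itertools.groupby(alignmentColumns, isGapless):
--         if k:
--             matchLength = sum(1 for i in v)
--             yield str(matchLength)
--         else:
--             blockRows = itertools.izip(*v)
--             insertLengths = (len(i) - i.count("-") for i in blockRows)
--             yield ":".join(map(str, insertLengths))
-- ===== SOURCE B (Python) =====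
-- def matchAndInsertLengths(alignmentColumns):
--     # One streaming pass: a run flag, a column counter for match runs, and
--     # per-row gap-free counts for insert runs, paired up with zip.
--     matching = None
--     count = 0
--     counts = []
--     for col in alignmentColumns:
--         gapless = "-" not in col
--         if gapless != matching:
--             if matching is True:
--                 yield str(count)
--             elif matching is False:
--                 yield ":".join(map(str, counts))
--             matching = gapless
--             count = 0
--             counts = [0] * len(col)
--         if gapless:
--             count += 1
--         else:
--             counts = [c + (ch != "-") for c, ch in zip(counts, col)]
--     if matching is True:
--         yield str(count)
--     elif matching is False:
--         yield ":".join(map(str, counts))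
-- ===== Notes on version B (the rewrite author's own statement) =====
-- stated objective: alternative
-- what changed: Replaces itertools.groupby plus an izip transpose with one streaming pass that tracks a run flag, a match counter and per-row insert counts updated by zipping the counts with each column, emitting each run's string when the flag flips and once at the end.
import Mathlib
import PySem

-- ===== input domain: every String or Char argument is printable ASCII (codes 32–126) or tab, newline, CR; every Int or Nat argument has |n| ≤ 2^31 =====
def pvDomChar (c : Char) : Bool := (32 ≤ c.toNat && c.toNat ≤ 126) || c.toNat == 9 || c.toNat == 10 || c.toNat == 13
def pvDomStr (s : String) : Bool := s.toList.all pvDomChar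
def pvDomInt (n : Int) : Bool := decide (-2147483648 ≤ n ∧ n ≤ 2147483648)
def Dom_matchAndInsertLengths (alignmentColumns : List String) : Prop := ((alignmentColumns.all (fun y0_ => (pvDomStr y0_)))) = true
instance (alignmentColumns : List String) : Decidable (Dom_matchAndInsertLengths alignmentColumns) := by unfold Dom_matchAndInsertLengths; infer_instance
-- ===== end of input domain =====

-- B replaces groupby + izip-transpose by one streaming pass with a run flag, a match counter
-- and per-row insert counts updated with zip (alternative decomposition, no speed claim).

-- ===== PORT A =====
def isGapless (s : String) : Bool := !(PySem.Str.isIn "-" s)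

-- itertools.groupby(xs, f): consecutive runs with their key
def pyGroupbyAux (f : String → Bool) (k : Bool) (acc : List String) : List String → List (Bool × List String)
  | [] => [(k, acc.reverse)]
  | y :: ys => if f y = k then pyGroupbyAux f k (y :: acc) ys
               else (k, acc.reverse) :: pyGroupbyAux f (f y) [y] ys

def pyGroupby (f : String → Bool) : List String → List (Bool × List String)
  | [] => []
  | x :: xs => pyGroupbyAux f (f x) [x] xs

-- izip(*v): rows truncated to the shortest string (izip = zip, Python-2 semantics)
def blockRowsOf (v : List String) : List (List Char) :=
  let m := match v.map (fun s => s.toList.length) with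
    | [] => 0
    | l :: ls => ls.foldl Nat.min l
  (List.range m).map (fun i => v.map (fun s => s.toList.getD i ' '))

def matchAndInsertLengths (alignmentColumns : List String) : List String :=
  (pyGroupby isGapless alignmentColumns).map (fun kv =>
    if kv.1 then PySem.Int.toStr (kv.2.length : Int)
    else
      let insertLengths := (blockRowsOf kv.2).map
        (fun row => PySem.Int.toStr ((row.length : Int) - (row.count '-' : Int)))
      PySem.Str.join ":" insertLengths)

-- ===== PORT B =====
-- flush: the two trailing 'yield's of Source B (and the same code at a flag flip)
def altFlush (matching : Option Bool) (count : Int) (counts : List Int) : List String :=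
  match matching with
  | none => []
  | some true => [PySem.Int.toStr count]
  | some false => [PySem.Str.join ":" (counts.map PySem.Int.toStr)]

-- '[c + (ch != "-") for c, ch in zip(counts, col)]' (zip truncates to the shorter)
def altZipBump (counts : List Int) (col : String) : List Int :=
  List.zipWith (fun (c : Int) ch => if ch ≠ '-' then c + 1 else c) counts col.toList

-- the for-loop of Source B
def altLoop (cols : List String) (out : List String) (matching : Option Bool)
    (count : Int) (counts : List Int) : List String :=
  match cols with
  | [] => out ++ altFlush matching count counts
  | col :: rest =>
    let g := !(PySem.Str.isIn "-" col)
    let (out', matching', count', counts') :=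
      if matching ≠ some g then
        (out ++ altFlush matching count counts, some g, (0 : Int),
          List.replicate col.toList.length (0 : Int))
      else (out, matching, count, counts)
    if g then
      altLoop rest out' matching' (count' + 1) counts'
    else
      altLoop rest out' matching' count' (altZipBump counts' col)

def matchAndInsertLengths_alt (alignmentColumns : List String) : List String :=
  altLoop alignmentColumns [] none 0 []

-- ===== PRECONDITION & SPEC =====
def Spec_matchAndInsertLengths (alignmentColumns : List String) (out : List String) : Prop := out = matchAndInsertLengths_alt alignmentColumns
instance (alignmentColumns : List String) (out : List String) : Decidable (Spec_matchAndInsertLengths alignmentColumns out) := by unfold Spec_matchAndInsertLengths; infer_instance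

-- ===== CLAIM (what is proved, stated in full; the proofs are below) =====
def Claim_equal_matchAndInsertLengths : Prop := ∀ (alignmentColumns : List String), Dom_matchAndInsertLengths alignmentColumns → Spec_matchAndInsertLengths alignmentColumns (matchAndInsertLengths alignmentColumns)

-- ===== LEMMAS AND PROOFS =====

-- proof-side vocabulary: counts after the first column of a run (initCounts), counts a
-- whole run produces (foldCounts), and the closed form canon.
def initCounts (x : String) : List Int :=
  altZipBump (List.replicate x.toList.length (0 : Int)) x

def foldCounts : List String → List Int
  | [] => []
  | x :: xs => xs.foldl altZipBump (initCounts x)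

def minLen (v : List String) : Nat :=
  match v.map (fun s => s.toList.length) with
  | [] => 0
  | l :: ls => ls.foldl Nat.min l

def canon (v : List String) : List Int :=
  (List.range (minLen v)).map (fun i => (v.countP (fun s => s.toList.getD i ' ' != '-') : Int))

def emitRun (kv : Bool × List String) : String :=
  if kv.1 then PySem.Int.toStr (kv.2.length : Int)
  else PySem.Str.join ":" ((foldCounts kv.2).map PySem.Int.toStr)

lemma minLen_append_singleton (p : List String) (hp : p ≠ []) (y : String) :
    minLen (p ++ [y]) = Nat.min (minLen p) y.toList.length := by
  obtain ⟨a, as, rfl⟩ := List.exists_cons_of_ne_nil hp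
  simp [minLen, List.foldl_append]

lemma canon_length (v : List String) : (canon v).length = minLen v := by
  simp [canon]

lemma bump_canon (p : List String) (hp : p ≠ []) (y : String) :
    altZipBump (canon p) y = canon (p ++ [y]) := by
  apply List.ext_getElem
  · simp [altZipBump, canon_length, minLen_append_singleton p hp y]
  · intro i h1 h2
    have hi : i < Nat.min (minLen p) y.toList.length := by
      rw [canon_length, minLen_append_singleton p hp y] at h2; exact h2
    have hiy : i < y.toList.length := lt_of_lt_of_le hi (Nat.min_le_right _ _)
    simp only [altZipBump, List.getElem_zipWith, canon, List.getElem_map,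
      List.getElem_range, List.countP_append, List.countP_singleton]
    rw [List.getD_eq_getElem y.toList ' ' hiy]
    by_cases hc : y.toList[i] = '-' <;> simp [hc]

lemma initCounts_canon (x : String) : initCounts x = canon [x] := by
  apply List.ext_getElem
  · simp [initCounts, altZipBump, canon, minLen]
  · intro i h1 h2
    have hix : i < x.toList.length := by simpa [initCounts, altZipBump] using h1
    simp only [initCounts, altZipBump, List.getElem_zipWith, List.getElem_replicate, canon,
      List.getElem_map, List.getElem_range, List.countP_singleton]
    rw [List.getD_eq_getElem x.toList ' ' hix]
    by_cases hc : x.toList[i] = '-' <;> simp [hc]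

lemma foldl_bump_canon (rest : List String) : ∀ (p : List String), p ≠ [] →
    rest.foldl altZipBump (canon p) = canon (p ++ rest) := by
  induction rest with
  | nil => intro p _; simp
  | cons y ys ih =>
    intro p hp
    have : (y :: ys).foldl altZipBump (canon p) = ys.foldl altZipBump (canon (p ++ [y])) := by
      simp [List.foldl_cons, bump_canon p hp y]
    rw [this, ih (p ++ [y]) (by simp)]
    simp

lemma foldCounts_eq_canon (v : List String) (hv : v ≠ []) : foldCounts v = canon v := by
  obtain ⟨x, xs, rfl⟩ := List.exists_cons_of_ne_nil hv
  show xs.foldl altZipBump (initCounts x) = canon (x :: xs)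
  rw [initCounts_canon, foldl_bump_canon xs [x] (by simp)]
  simp

lemma foldCounts_append_singleton (p : List String) (hp : p ≠ []) (y : String) :
    foldCounts (p ++ [y]) = altZipBump (foldCounts p) y := by
  obtain ⟨a, as, rfl⟩ := List.exists_cons_of_ne_nil hp
  simp [foldCounts, List.foldl_append]

-- A's transpose branch computes canon
lemma blockRows_eq_canon (v : List String) :
    (blockRowsOf v).map (fun row => ((row.length : Int) - (row.count '-' : Int))) = canon v := by
  have hm : (match v.map (fun s => s.toList.length) with
      | [] => 0
      | l :: ls => ls.foldl Nat.min l) = minLen v := rfl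
  simp only [blockRowsOf, canon, List.map_map, hm]
  apply List.map_congr_left
  intro i _
  simp only [Function.comp_apply, List.length_map, List.count_eq_countP, List.countP_map]
  have hsplit : ∀ (l : List String) (f : String → Char),
      l.countP (fun s => f s == '-') + l.countP (fun s => f s != '-') = l.length := by
    intro l f
    induction l with
    | nil => rfl
    | cons a as ihl =>
      by_cases hc : f a = '-' <;> simp [hc] <;> omega
  have := hsplit v (fun s => s.toList.getD i ' ')
  simp only [Function.comp_def] at *
  omega

-- every group of pyGroupbyAux (started with a nonempty acc) is nonempty
lemma pyGroupbyAux_nonempty (xs : List String) : ∀ (k : Bool) (acc : List String), acc ≠ [] →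
    ∀ g ∈ pyGroupbyAux isGapless k acc xs, g.2 ≠ [] := by
  induction xs with
  | nil =>
    intro k acc hacc g hg
    simp only [pyGroupbyAux, List.mem_singleton] at hg
    subst hg; simpa using hacc
  | cons y ys ih =>
    intro k acc hacc g hg
    simp only [pyGroupbyAux] at hg
    by_cases hk : isGapless y = k
    · rw [if_pos hk] at hg
      exact ih k (y :: acc) (by simp) g hg
    · rw [if_neg hk] at hg
      rcases List.mem_cons.mp hg with h | h
      · subst h; simpa using hacc
      · exact ih (isGapless y) [y] (by simp) g h

lemma matchA_eq_map_emit (cols : List String) :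
    matchAndInsertLengths cols = (pyGroupby isGapless cols).map emitRun := by
  unfold matchAndInsertLengths
  apply List.map_congr_left
  intro kv hkv
  have hne : kv.2 ≠ [] := by
    cases cols with
    | nil => simp [pyGroupby] at hkv
    | cons x xs => exact pyGroupbyAux_nonempty xs (isGapless x) [x] (by simp) kv hkv
  rcases kv with ⟨k, v⟩
  cases k with
  | true => rfl
  | false =>
    have h1 : emitRun (false, v) = PySem.Str.join ":" ((foldCounts v).map PySem.Int.toStr) := by
      simp [emitRun]
    rw [h1, foldCounts_eq_canon v hne, ← blockRows_eq_canon v, List.map_map]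
    simp [Function.comp_def]

-- bridge: "-" in y, stated over y.toList
lemma isIn_dash (z : String) :
    PySem.Str.isIn "-" z = PySem.Chars.isIn ['-'] z.toList := by simp

-- B's loop, step lemmas (one per (flag, gapless) combination)
lemma altLoop_step_tt (y : String) (ys out : List String) (c : Int) (cs : List Int)
    (hy : PySem.Str.isIn "-" y = false) :
    altLoop (y :: ys) out (some true) c cs = altLoop ys out (some true) (c + 1) cs := by
  have hy' : PySem.Chars.isIn ['-'] y.toList = false := by rw [← isIn_dash]; exact hy
  simp [altLoop, hy']

lemma altLoop_step_tf (y : String) (ys out : List String) (c : Int) (cs : List Int)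
    (hy : PySem.Str.isIn "-" y = true) :
    altLoop (y :: ys) out (some true) c cs =
      altLoop ys (out ++ [PySem.Int.toStr c]) (some false) 0 (initCounts y) := by
  have hy' : PySem.Chars.isIn ['-'] y.toList = true := by rw [← isIn_dash]; exact hy
  simp [altLoop, hy', altFlush, initCounts]

lemma altLoop_step_ff (y : String) (ys out : List String) (cs : List Int)
    (hy : PySem.Str.isIn "-" y = true) :
    altLoop (y :: ys) out (some false) 0 cs =
      altLoop ys out (some false) 0 (altZipBump cs y) := by
  have hy' : PySem.Chars.isIn ['-'] y.toList = true := by rw [← isIn_dash]; exact hy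
  simp [altLoop, hy']

lemma altLoop_step_ft (y : String) (ys out : List String) (cs : List Int)
    (hy : PySem.Str.isIn "-" y = false) :
    altLoop (y :: ys) out (some false) 0 cs =
      altLoop ys (out ++ [PySem.Str.join ":" (cs.map PySem.Int.toStr)]) (some true) 1
        (List.replicate y.toList.length (0 : Int)) := by
  have hy' : PySem.Chars.isIn ['-'] y.toList = false := by rw [← isIn_dash]; exact hy
  simp [altLoop, hy', altFlush]

-- the loop invariant: inside a run with prefix p, B's state determines the remaining output
lemma altLoop_runs (xs : List String) : ∀ (out : List String) (p : List String), p ≠ [] →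
    (∀ (cs : List Int), altLoop xs out (some true) (p.length : Int) cs
        = out ++ (pyGroupbyAux isGapless true p.reverse xs).map emitRun)
    ∧ (altLoop xs out (some false) 0 (foldCounts p)
        = out ++ (pyGroupbyAux isGapless false p.reverse xs).map emitRun) := by
  induction xs with
  | nil =>
    intro out p hp
    constructor <;> intros <;> simp [altLoop, altFlush, pyGroupbyAux, emitRun]
  | cons y ys ih =>
    intro out p hp
    by_cases hy : PySem.Str.isIn "-" y = true
    · have hyC : PySem.Chars.isIn ['-'] y.toList = true := by rw [← isIn_dash]; exact hy
      have hg : isGapless y = false := by simp [isGapless, hyC]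
      constructor
      · intro cs
        rw [altLoop_step_tf y ys out _ cs hy]
        have hic : initCounts y = foldCounts [y] := rfl
        rw [hic, (ih (out ++ [PySem.Int.toStr (p.length : Int)]) [y] (by simp)).2]
        simp [pyGroupbyAux, hg, emitRun, List.append_assoc]
      · rw [altLoop_step_ff y ys out _ hy, ← foldCounts_append_singleton p hp y,
          (ih out (p ++ [y]) (by simp)).2]
        simp [pyGroupbyAux, hg]
    · have hy' : PySem.Str.isIn "-" y = false := by simpa using hy
      have hyC : PySem.Chars.isIn ['-'] y.toList = false := by rw [← isIn_dash]; exact hy'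
      have hg : isGapless y = true := by simp [isGapless, hyC]
      constructor
      · intro cs
        rw [altLoop_step_tt y ys out _ cs hy',
          show (p.length : Int) + 1 = (((p ++ [y]).length : Nat) : Int) by simp]
        rw [(ih out (p ++ [y]) (by simp)).1 cs]
        simp [pyGroupbyAux, hg]
      · rw [altLoop_step_ft y ys out (foldCounts p) hy',
          show (1 : Int) = ((([y] : List String).length : Nat) : Int) by simp]
        rw [(ih (out ++ [PySem.Str.join ":" ((foldCounts p).map PySem.Int.toStr)]) [y] (by simp)).1 _]
        simp [pyGroupbyAux, hg, emitRun, List.append_assoc]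

lemma matchB_eq_map_emit (cols : List String) :
    matchAndInsertLengths_alt cols = (pyGroupby isGapless cols).map emitRun := by
  cases cols with
  | nil => simp [matchAndInsertLengths_alt, altLoop, altFlush, pyGroupby]
  | cons x xs =>
    unfold matchAndInsertLengths_alt
    by_cases hx : PySem.Str.isIn "-" x = true
    · have hx' : PySem.Chars.isIn ['-'] x.toList = true := by rw [← isIn_dash]; exact hx
      have hg : isGapless x = false := by simp [isGapless, hx']
      have hstep : altLoop (x :: xs) [] none 0 [] =
          altLoop xs [] (some false) 0 (initCounts x) := by
        simp [altLoop, hx', altFlush, initCounts]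
      have hic : initCounts x = foldCounts [x] := rfl
      rw [hstep, hic, (altLoop_runs xs [] [x] (by simp)).2]
      simp [pyGroupby, hg]
    · have hx' : PySem.Str.isIn "-" x = false := by simpa using hx
      have hx'' : PySem.Chars.isIn ['-'] x.toList = false := by rw [← isIn_dash]; exact hx'
      have hg : isGapless x = true := by simp [isGapless, hx'']
      have hstep : altLoop (x :: xs) [] none 0 [] =
          altLoop xs [] (some true) 1 (List.replicate x.toList.length (0 : Int)) := by
        simp [altLoop, hx'', altFlush]
      rw [hstep, show (1 : Int) = ((([x] : List String).length : Nat) : Int) by simp,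
        (altLoop_runs xs [] [x] (by simp)).1 _]
      simp [pyGroupby, hg]

-- ===== VERDICT (by name: the statement is the Claim_ definition above) =====
theorem matchAndInsertLengths_spec : Claim_equal_matchAndInsertLengths := by
  intro cols _
  unfold Spec_matchAndInsertLengths
  rw [matchA_eq_map_emit cols, matchB_eq_map_emit cols]
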